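-- pv_equiv track=rewrite | github.com/TNick/exdrf | exdrf-qt/exdrf_qt/scripts/gen_ui_file.py | _split_translate_line
-- ===== SOURCE A (Python) =====
-- from typing import List, Optional, Set, Tuple
--
-- MAX_LINE_LENGTH = 80
--
-- def _chunk_words(words: List[str], max_chunk: int) -> List[str]:
--     """Split a list of words into chunks of at most max_chunk characters."""
--     chunks: List[str] = []
--     current: List[str] = []
--     current_len = 0
--     for w in words:
--         need = len(w) + (1 if current else 0)
--         if current and current_len + need > max_chunk:
--             chunks.append(" ".join(current))
--             current = [w]
--             current_len = len(w)
--         else: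
--             current.append(w)
--             current_len += need
--     if current:
--         chunks.append(" ".join(current))
--     return chunks
--
-- def _find_closing_quote(line: str, start: int) -> Optional[int]:
--     """Return index of closing double-quote, respecting \\\"; None if not found."""
--     i = start
--     while i < len(line):
--         if line[i] == "\\" and i + 1 < len(line):
--             i += 2
--             continue
--         if line[i] == '"':
--             return i
--         i += 1
--     return None
--
-- def _split_translate_line(
--     line: str, max_length: int = MAX_LINE_LENGTH
-- ) -> List[str]:
--     """Split a long line containing _translate(\"Context\", \"long string\") into multiple lines.
--
--     If the line is too long and contains exactly one _translate(..., "second_arg")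
--     call, the second (translatable) string is split at word boundaries into
--     multiple concatenated \"...\" lines. Otherwise returns [line].
--     """
--     if len(line) <= max_length:
--         return [line]
--     idx = line.find("_translate(")
--     if idx < 0:
--         return [line]
--     # First quoted argument (context): after _translate(
--     open_paren = idx + len("_translate(")
--     if open_paren >= len(line) or line[open_paren] != '"':
--         return [line]
--     first_end = _find_closing_quote(line, open_paren + 1)
--     if first_end is None:
--         return [line]
--     # Expect ", " then second string.
--     after_first = first_end + 1
--     if (
--         after_first + 2 > len(line)
--         or line[after_first : after_first + 2] != ", "
--     ):
--         return [line]
--     second_start = after_first + 2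
--     if second_start >= len(line) or line[second_start] != '"':
--         return [line]
--     second_content_start = second_start + 1
--     second_end = _find_closing_quote(line, second_content_start)
--     if second_end is None:
--         return [line]
--     content = line[second_content_start:second_end]
--     tail = line[second_end + 1 :]
--     indent = line[: len(line) - len(line.lstrip())]
--     cont_indent = indent + "    "
--     max_chunk = max_length - len(cont_indent) - 2
--     if max_chunk < 10:
--         return [line]
--     words = content.split(" ")
--     chunks = _chunk_words(words, max_chunk)
--     if len(chunks) <= 1:
--         return [line]
--     prefix = line[:second_start]
--     if len(prefix) > max_length:
--         return [line]
--     result = [prefix]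
--     for chunk in chunks[:-1]:
--         result.append(cont_indent + '"' + chunk + ' "')
--     result.append(cont_indent + '"' + chunks[-1] + '"' + tail)
--     return result
-- ===== SOURCE B (Python) =====
-- from typing import List, Optional, Tuple
--
-- MAX_LINE_LENGTH = 80
--
--
-- def _scan_quoted(s: str) -> Optional[Tuple[str, str]]:
--     """Consume a quoted-string body from s (text right after an opening quote).
--
--     Return (body, rest_after_closing_quote), or None if no unescaped closing
--     quote exists.  A backslash escapes the character after it.
--     """
--     body: List[str] = []
--     while s:
--         if s[0] == "\\" and len(s) >= 2:
--             body.append(s[:2])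
--             s = s[2:]
--         elif s[0] == '"':
--             return "".join(body), s[1:]
--         else:
--             body.append(s[0])
--             s = s[1:]
--     return None
--
--
-- def _pack(words: List[str], max_chunk: int) -> List[str]:
--     """Greedily pack a non-empty word list into space-joined chunks."""
--     out: List[str] = []
--     cur = words[0]
--     for w in words[1:]:
--         if len(cur) + 1 + len(w) > max_chunk:
--             out.append(cur)
--             cur = w
--         else:
--             cur = cur + " " + w
--     out.append(cur)
--     return out
--
--
-- def _split_translate_line(
--     line: str, max_length: int = MAX_LINE_LENGTH
-- ) -> List[str]:
--     """Split a long _translate("Context", "long string") line at word boundaries."""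
--     if len(line) <= max_length:
--         return [line]
--     idx = line.find('_translate(')
--     if idx < 0:
--         return [line]
--     rest0 = line[idx + 11:]
--     if not rest0.startswith('"'):
--         return [line]
--     first = _scan_quoted(rest0[1:])
--     if first is None:
--         return [line]
--     ctx, rest = first
--     if not rest.startswith(', "'):
--         return [line]
--     second = _scan_quoted(rest[3:])
--     if second is None:
--         return [line]
--     content, tail = second
--     indent_chars: List[str] = []
--     for c in line:
--         if not c.isspace():
--             break
--         indent_chars.append(c)
--     cont_indent = "".join(indent_chars) + "    "
--     max_chunk = max_length - len(cont_indent) - 2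
--     if max_chunk < 10:
--         return [line]
--     chunks = _pack(content.split(" "), max_chunk)
--     if len(chunks) <= 1:
--         return [line]
--     prefix = line[:idx] + '_translate("' + ctx + '", '
--     if len(prefix) > max_length:
--         return [line]
--     return (
--         [prefix]
--         + [cont_indent + '"' + c + ' "' for c in chunks[:-1]]
--         + [cont_indent + '"' + chunks[-1] + '"' + tail]
--     )
-- ===== Notes on version B (the rewrite author's own statement) =====
-- stated objective: alternative
-- what changed: B replaces the index-arithmetic scanning (_find_closing_quote over absolute indices plus slice-offset bookkeeping) by a consuming parser that returns (body, rest) pairs and rebuilds the prefix from its parts, packs words greedily with a string accumulator instead of a word-list plus join, and reads the indent with a take-while loop instead of lstrip length arithmetic.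
import Mathlib
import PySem

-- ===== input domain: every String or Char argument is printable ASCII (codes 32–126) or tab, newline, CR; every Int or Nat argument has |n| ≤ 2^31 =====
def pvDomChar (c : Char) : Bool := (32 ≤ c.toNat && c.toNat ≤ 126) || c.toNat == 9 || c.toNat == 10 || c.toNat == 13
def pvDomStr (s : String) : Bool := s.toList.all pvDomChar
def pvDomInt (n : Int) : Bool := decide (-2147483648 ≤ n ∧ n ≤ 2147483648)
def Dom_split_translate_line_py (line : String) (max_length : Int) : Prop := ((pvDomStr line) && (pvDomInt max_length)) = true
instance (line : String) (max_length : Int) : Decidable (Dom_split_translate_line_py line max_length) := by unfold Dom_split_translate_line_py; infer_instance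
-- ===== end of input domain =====

-- B re-implements the split with a consuming quoted-string parser (body, rest) and a
-- string-accumulator word packer instead of A's absolute-index scanning and word-list joining;
-- same value on every input (alternative structure, no speed claim).

-- ===== PORT A =====

-- port of _find_closing_quote (index loop; start is always a valid nonneg index here)
def findClosingQuote (cs : List Char) (i : Nat) : Option Nat :=
  if h : i < cs.length then
    if cs[i] = '\\' ∧ i + 1 < cs.length then findClosingQuote cs (i + 2)
    else if cs[i] = '"' then some i
    else findClosingQuote cs (i + 1)
  else none
termination_by cs.length - i

-- port of _chunk_words' loop body: state (chunks, current, current_len)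
def chunkStep (maxChunk : Int) (st : List (List Char) × List (List Char) × Int)
    (w : List Char) : List (List Char) × List (List Char) × Int :=
  let need : Int := (w.length : Int) + (if st.2.1 ≠ [] then 1 else 0)
  if st.2.1 ≠ [] ∧ st.2.2 + need > maxChunk then
    (st.1 ++ [PySem.Chars.join [' '] st.2.1], [w], (w.length : Int))
  else (st.1, st.2.1 ++ [w], st.2.2 + need)

-- port of _chunk_words
def chunkWords (words : List (List Char)) (maxChunk : Int) : List (List Char) :=
  let st := words.foldl (chunkStep maxChunk) ([], [], 0)
  if st.2.1 ≠ [] then st.1 ++ [PySem.Chars.join [' '] st.2.1] else st.1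

-- port of _split_translate_line (A), on the character list
def splitCoreA (cs : List Char) (maxLength : Int) : List (List Char) :=
  if (cs.length : Int) ≤ maxLength then [cs] else
  let idx := PySem.Chars.find cs "_translate(".toList
  if idx < 0 then [cs] else
  let op := idx.toNat + 11
  if (op : Int) ≥ (cs.length : Int) then [cs] else
  if PySem.List.pyGetD cs (op : Int) ' ' ≠ '"' then [cs] else
  match findClosingQuote cs (op + 1) with
  | none => [cs]
  | some firstEnd =>
    let af := firstEnd + 1
    if af + 2 > cs.length then [cs] else
    if PySem.List.slice cs (some (af : Int)) (some ((af : Int) + 2)) ≠ ", ".toList then [cs] else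
    let ss := af + 2
    if (ss : Int) ≥ (cs.length : Int) then [cs] else
    if PySem.List.pyGetD cs (ss : Int) ' ' ≠ '"' then [cs] else
    match findClosingQuote cs (ss + 1) with
    | none => [cs]
    | some se =>
      let content := PySem.List.slice cs (some ((ss : Int) + 1)) (some (se : Int))
      let tl := PySem.List.slice cs (some ((se : Int) + 1)) none
      let indent := PySem.List.slice cs none (some ((cs.length : Int) - ((PySem.Chars.lstrip cs).length : Int)))
      let contIndent := indent ++ "    ".toList
      let maxChunk := maxLength - (contIndent.length : Int) - 2
      if maxChunk < 10 then [cs] else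
      let words := PySem.Chars.splitOn content [' ']
      let chunks := chunkWords words maxChunk
      if chunks.length ≤ 1 then [cs] else
      let pfx := PySem.List.slice cs none (some (ss : Int))
      if (pfx.length : Int) > maxLength then [cs] else
      let result := (PySem.List.slice chunks none (some (-1))).foldl
        (fun acc c => acc ++ [contIndent ++ '"' :: c ++ [' ', '"']]) [pfx]
      result ++ [contIndent ++ '"' :: (PySem.List.pyGetD chunks (-1) []) ++ ['"'] ++ tl]

def split_translate_line_py (line : String) (max_length : Int) : List String :=
  (splitCoreA line.toList max_length).map String.ofList

-- ===== PORT B =====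

-- port of _scan_quoted (loop with a body accumulator, consuming s from the front)
def scanQuotedGo (body : List Char) (s : List Char) : Option (List Char × List Char) :=
  match s with
  | [] => none
  | c :: rest =>
    if c = '\\' ∧ rest ≠ [] then scanQuotedGo (body ++ [c, rest.headI]) rest.tail
    else if c = '"' then some (body, rest)
    else scanQuotedGo (body ++ [c]) rest
termination_by s.length
decreasing_by
  · rename_i h; cases rest with
    | nil => exact absurd rfl h.2
    | cons a t => simp
  · simp

-- port of _pack's loop: state (out, cur)
def packGo (maxChunk : Int) (out : List (List Char)) (cur : List Char) :
    List (List Char) → List (List Char)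
  | [] => out ++ [cur]
  | w :: ws =>
    if (cur.length : Int) + 1 + (w.length : Int) > maxChunk then
      packGo maxChunk (out ++ [cur]) w ws
    else packGo maxChunk out (cur ++ ' ' :: w) ws

-- port of _pack (words is never empty at the call site; headI/tail mirror words[0]/words[1:])
def pack (words : List (List Char)) (maxChunk : Int) : List (List Char) :=
  packGo maxChunk [] words.headI words.tail

-- port of _split_translate_line (B), on the character list
def splitCoreB (cs : List Char) (maxLength : Int) : List (List Char) :=
  if (cs.length : Int) ≤ maxLength then [cs] else
  let idx := PySem.Chars.find cs "_translate(".toList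
  if idx < 0 then [cs] else
  let rest0 := cs.drop (idx.toNat + 11)
  if ¬ PySem.Chars.startswith rest0 ['"'] then [cs] else
  match scanQuotedGo [] rest0.tail with
  | none => [cs]
  | some (ctx, rest) =>
    if ¬ PySem.Chars.startswith rest ", \"".toList then [cs] else
    match scanQuotedGo [] (rest.drop 3) with
    | none => [cs]
    | some (content, tl) =>
      let contIndent := cs.takeWhile PySem.Chars.isspace ++ "    ".toList
      let maxChunk := maxLength - (contIndent.length : Int) - 2
      if maxChunk < 10 then [cs] else
      let chunks := pack (PySem.Chars.splitOn content [' ']) maxChunk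
      if chunks.length ≤ 1 then [cs] else
      let pfx := cs.take idx.toNat ++ "_translate(\"".toList ++ ctx ++ "\", ".toList
      if (pfx.length : Int) > maxLength then [cs] else
      [pfx] ++ chunks.dropLast.map (fun c => contIndent ++ '"' :: c ++ [' ', '"'])
        ++ [contIndent ++ '"' :: chunks.getLastI ++ ['"'] ++ tl]

def split_translate_line_py_alt (line : String) (max_length : Int) : List String :=
  (splitCoreB line.toList max_length).map String.ofList

-- ===== PRECONDITION & SPEC =====
def Spec_split_translate_line_py (line : String) (max_length : Int) (out : List String) : Prop := out = split_translate_line_py_alt line max_length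
instance (line : String) (max_length : Int) (out : List String) : Decidable (Spec_split_translate_line_py line max_length out) := by unfold Spec_split_translate_line_py; infer_instance

-- ===== CLAIM (what is proved, stated in full; the proofs are below) =====
def Claim_equal_split_translate_line_py : Prop := ∀ (line : String) (max_length : Int), Dom_split_translate_line_py line max_length → Spec_split_translate_line_py line max_length (split_translate_line_py line max_length)

-- ===== LEMMAS AND PROOFS =====

theorem fcq_cons (c : Char) (cs : List Char) (i : Nat) :
    findClosingQuote (c :: cs) (i + 1) = (findClosingQuote cs i).map (· + 1) := by
  induction i using findClosingQuote.induct (cs := cs) with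
  | case1 i h hb ih =>
    conv_lhs => rw [findClosingQuote.eq_def]
    conv_rhs => rw [findClosingQuote.eq_def]
    obtain ⟨hb1, hb2⟩ := hb
    simp only [List.length_cons, List.getElem_cons_succ]
    rw [dif_pos (show i + 1 < cs.length + 1 by omega), dif_pos h,
      if_pos (show cs[i] = '\\' ∧ i + 1 + 1 < cs.length + 1 from ⟨hb1, by omega⟩),
      if_pos (show cs[i] = '\\' ∧ i + 1 < cs.length from ⟨hb1, hb2⟩)]
    exact ih
  | case2 i h hb hq =>
    conv_lhs => rw [findClosingQuote.eq_def]
    conv_rhs => rw [findClosingQuote.eq_def]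
    simp only [dif_pos h, show i + 1 < (c :: cs).length from by simp; omega, dite_true,
      List.getElem_cons_succ]
    rw [if_neg, if_neg hb, if_pos hq, if_pos hq]
    · simp
    · simp only [List.length_cons]; intro hc; exact hb ⟨hc.1, by omega⟩
  | case3 i h hb hq ih =>
    conv_lhs => rw [findClosingQuote.eq_def]
    conv_rhs => rw [findClosingQuote.eq_def]
    simp only [dif_pos h, show i + 1 < (c :: cs).length from by simp; omega, dite_true,
      List.getElem_cons_succ]
    rw [if_neg, if_neg hb, if_neg hq, if_neg hq]
    · exact ih
    · simp only [List.length_cons]; intro hc; exact hb ⟨hc.1, by omega⟩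
  | case4 i h =>
    conv_lhs => rw [findClosingQuote.eq_def]
    conv_rhs => rw [findClosingQuote.eq_def]
    rw [dif_neg h, dif_neg]
    · simp
    · simp only [List.length_cons]; omega

theorem fcq_drop (cs : List Char) : ∀ (i : Nat),
    findClosingQuote cs i = (findClosingQuote (cs.drop i) 0).map (· + i) := by
  induction cs with
  | nil =>
    intro i
    rw [findClosingQuote.eq_def]
    simp only [List.length_nil]
    rw [dif_neg (by omega)]
    rw [List.drop_nil, findClosingQuote.eq_def]
    simp
  | cons c cs ih =>
    intro i
    cases i with
    | zero => cases h : findClosingQuote (c :: cs) 0 <;> simp [h]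
    | succ j =>
      rw [fcq_cons, ih j]
      simp only [List.drop_succ_cons]
      cases h : findClosingQuote (cs.drop j) 0 <;> simp
      omega

theorem fcq_quote (cs : List Char) : ∀ (i e : Nat), findClosingQuote cs i = some e →
    cs[e]? = some '"' := by
  intro i
  induction i using findClosingQuote.induct (cs := cs) with
  | case1 i h hb ih =>
    intro e he
    rw [findClosingQuote.eq_def, dif_pos h, if_pos hb] at he
    exact ih e he
  | case2 i h hb hq =>
    intro e he
    rw [findClosingQuote.eq_def, dif_pos h, if_neg hb, if_pos hq] at he
    obtain rfl : i = e := by simpa using he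
    simp [List.getElem?_eq_getElem h, hq]
  | case3 i h hb hq ih =>
    intro e he
    rw [findClosingQuote.eq_def, dif_pos h, if_neg hb, if_neg hq] at he
    exact ih e he
  | case4 i h =>
    intro e he
    rw [findClosingQuote.eq_def, dif_neg h] at he
    exact absurd he (by simp)

theorem scan_eq_fcq (s body : List Char) :
    scanQuotedGo body s =
      match findClosingQuote s 0 with
      | none => none
      | some e => some (body ++ s.take e, s.drop (e + 1)) := by
  induction body, s using scanQuotedGo.induct with
  | case1 body =>
    rw [scanQuotedGo, findClosingQuote.eq_def]
    simp
  | case2 body c rest hb ih =>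
    obtain ⟨rfl, hr⟩ := hb
    obtain ⟨r0, rs, rfl⟩ : ∃ r0 rs, rest = r0 :: rs := by
      cases rest with
      | nil => exact absurd rfl hr
      | cons a t => exact ⟨a, t, rfl⟩
    rw [scanQuotedGo]
    rw [if_pos ⟨rfl, hr⟩]
    have hf : findClosingQuote ('\\' :: r0 :: rs) 0 = (findClosingQuote rs 0).map (· + 2) := by
      rw [findClosingQuote.eq_def]
      rw [dif_pos (by simp)]
      rw [if_pos (by simp)]
      have : findClosingQuote ('\\' :: r0 :: rs) (0 + 1 + 1) = ((findClosingQuote rs 0).map (· + 1)).map (· + 1) := by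
        rw [fcq_cons]
        congr 1
        rw [fcq_cons]
      simpa [Option.map_map, Function.comp] using this
    rw [hf]
    simp only [List.headI, List.tail] at ih ⊢
    rw [ih]
    cases h : findClosingQuote rs 0 with
    | none => simp
    | some e => simp [List.take_succ_cons, List.drop_succ_cons]
  | case3 body rest hb =>
    rw [scanQuotedGo]
    rw [if_neg hb, if_pos rfl]
    rw [findClosingQuote.eq_def]
    rw [dif_pos (by simp)]
    rw [if_neg (by simp), if_pos (by simp)]
    simp
  | case4 body c rest hb hq ih =>
    rw [scanQuotedGo]
    rw [if_neg hb, if_neg hq]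
    have hf : findClosingQuote (c :: rest) 0 = (findClosingQuote rest 0).map (· + 1) := by
      rw [findClosingQuote.eq_def]
      rw [dif_pos (by simp)]
      rw [if_neg (by
        intro hcond
        refine hb ⟨by simpa using hcond.1, ?_⟩
        have h2 := hcond.2
        simp only [List.length_cons] at h2
        exact List.ne_nil_of_length_pos (by omega))]
      rw [if_neg (by simpa using hq)]
      exact fcq_cons c rest 0
    rw [hf, ih]
    cases h : findClosingQuote rest 0 with
    | none => simp
    | some e => simp [List.take_succ_cons, List.drop_succ_cons]

theorem join_append_singleton (cur : List (List Char)) (w : List Char) (h : cur ≠ []) :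
    PySem.Chars.join [' '] (cur ++ [w]) = PySem.Chars.join [' '] cur ++ ' ' :: w := by
  induction cur with
  | nil => exact absurd rfl h
  | cons x t ih =>
    cases t with
    | nil => simp [PySem.Chars.join_cons_cons, PySem.Chars.join_singleton]
    | cons y u =>
      rw [List.cons_append, PySem.Chars.join_cons_cons]
      rw [show (y :: u) ++ [w] = y :: (u ++ [w]) from rfl] at *
      rw [PySem.Chars.join_cons_cons]
      rw [ih (by simp)]
      simp

theorem chunk_loop_eq_packGo (mc : Int) (ws : List (List Char)) : ∀ (out : List (List Char))
    (cur : List (List Char)), cur ≠ [] →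
    (let st := ws.foldl (chunkStep mc) (out, cur, ((PySem.Chars.join [' '] cur).length : Int))
     if st.2.1 ≠ [] then st.1 ++ [PySem.Chars.join [' '] st.2.1] else st.1)
      = packGo mc out (PySem.Chars.join [' '] cur) ws := by
  induction ws with
  | nil =>
    intro out cur h
    simp only [List.foldl_nil, packGo]
    rw [if_pos h]
  | cons w ws ih =>
    intro out cur h
    simp only [List.foldl_cons, packGo]
    rw [show chunkStep mc (out, cur, ((PySem.Chars.join [' '] cur).length : Int)) w
        = if cur ≠ [] ∧ ((PySem.Chars.join [' '] cur).length : Int) + ((w.length : Int) + (if cur ≠ [] then 1 else 0)) > mc then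
            (out ++ [PySem.Chars.join [' '] cur], [w], (w.length : Int))
          else (out, cur ++ [w], ((PySem.Chars.join [' '] cur).length : Int) + ((w.length : Int) + (if cur ≠ [] then 1 else 0)))
      from rfl]
    simp only [ne_eq, h, not_false_eq_true, if_true, true_and]
    by_cases hc : ((PySem.Chars.join [' '] cur).length : Int) + ((w.length : Int) + 1) > mc
    · rw [if_pos hc, if_pos (show ((PySem.Chars.join [' '] cur).length : Int) + 1 + (w.length : Int) > mc by omega)]
      have h2 := ih (out ++ [PySem.Chars.join [' '] cur]) [w] (by simp)
      rw [PySem.Chars.join_singleton] at h2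
      simpa using h2
    · rw [if_neg hc, if_neg (show ¬(((PySem.Chars.join [' '] cur).length : Int) + 1 + (w.length : Int) > mc) by omega)]
      have h2 := ih out (cur ++ [w]) (by simp)
      rw [join_append_singleton cur w h] at h2
      have hlen : (((PySem.Chars.join [' '] cur ++ ' ' :: w).length : Nat) : Int)
          = ((PySem.Chars.join [' '] cur).length : Int) + ((w.length : Int) + 1) := by
        push_cast [List.length_append, List.length_cons]
        ring
      rw [hlen] at h2
      simpa using h2

theorem chunkWords_eq_pack (words : List (List Char)) (mc : Int) (h : words ≠ []) :
    chunkWords words mc = pack words mc := by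
  obtain ⟨w, ws, rfl⟩ : ∃ w ws, words = w :: ws := by
    cases words with
    | nil => exact absurd rfl h
    | cons a t => exact ⟨a, t, rfl⟩
  unfold chunkWords pack
  simp only [List.foldl_cons, List.headI, List.tail]
  rw [show chunkStep mc ([], [], 0) w = ([], [w], ((w.length : Int) + 0)) from by
    simp [chunkStep]]
  have h2 := chunk_loop_eq_packGo mc ws [] [w] (by simp)
  rw [PySem.Chars.join_singleton] at h2
  have : ((w.length : Int) + 0) = ((w.length : Nat) : Int) := by ring
  rw [this]
  exact h2

theorem splitOn_go_ne_nil (sep : List Char) (fuel : Nat) :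
    ∀ (l cur : List Char) (acc : List (List Char)), PySem.Chars.splitOn.go sep fuel l cur acc ≠ [] := by
  induction fuel with
  | zero => intro l cur acc; rw [PySem.Chars.splitOn.go.eq_def]; simp
  | succ n ih =>
    intro l cur acc
    cases l with
    | nil => rw [PySem.Chars.splitOn.go.eq_def]; simp
    | cons c rest =>
      have hred : PySem.Chars.splitOn.go sep (n+1) (c::rest) cur acc
          = if sep.isPrefixOf (c::rest) = true then
              PySem.Chars.splitOn.go sep n (List.drop sep.length (c::rest)) [] (cur.reverse :: acc)
            else PySem.Chars.splitOn.go sep n rest (c :: cur) acc := rfl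
      rw [hred]
      split_ifs with h
      · exact ih _ _ _
      · exact ih _ _ _

theorem splitOn_ne_nil (s sep : List Char) : PySem.Chars.splitOn s sep ≠ [] := by
  unfold PySem.Chars.splitOn
  exact splitOn_go_ne_nil _ _ _ _ _

theorem take_length_takeWhile {α : Type} (l : List α) (p : α → Bool) :
    l.take ((l.takeWhile p).length) = l.takeWhile p := by
  induction l with
  | nil => simp
  | cons c t ih =>
    by_cases hc : p c
    · simp [hc, ih]
    · simp [hc]

theorem indent_eq (cs : List Char) :
    PySem.List.slice cs none (some ((cs.length : Int) - ((PySem.Chars.lstrip cs).length : Int)))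
      = cs.takeWhile PySem.Chars.isspace := by
  have hle : (PySem.Chars.lstrip cs).length ≤ cs.length := by
    simp [PySem.Chars.lstrip]
    exact List.length_dropWhile_le _ _
  have hb : (0:Int) ≤ (cs.length : Int) - ((PySem.Chars.lstrip cs).length : Int) := by omega
  rw [PySem.List.slice_to _ hb]
  have : ((cs.length : Int) - ((PySem.Chars.lstrip cs).length : Int)).toNat
      = (cs.takeWhile PySem.Chars.isspace).length := by
    have := List.takeWhile_append_dropWhile (p := PySem.Chars.isspace) (l := cs)
    have hlen := congrArg List.length this
    simp only [List.length_append] at hlen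
    simp [PySem.Chars.lstrip]
    omega
  rw [this]
  exact take_length_takeWhile cs PySem.Chars.isspace

-- the cores agree
theorem core_eq (cs : List Char) (ml : Int) : splitCoreA cs ml = splitCoreB cs ml := by
  simp only [splitCoreA, splitCoreB]
  by_cases h0 : (cs.length : Int) ≤ ml
  · rw [if_pos h0, if_pos h0]
  rw [if_neg h0, if_neg h0]
  by_cases h1 : PySem.Chars.find cs "_translate(".toList < 0
  · rw [if_pos h1, if_pos h1]
  rw [if_neg h1, if_neg h1]
  set n := (PySem.Chars.find cs "_translate(".toList).toNat with hn
  have hfind0 : 0 ≤ PySem.Chars.find cs "_translate(".toList := by omega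
  have hpre : "_translate(".toList <+: cs.drop n := (PySem.Chars.find_spec hfind0).1
  have hnle : n ≤ cs.length := by
    have := PySem.Chars.find_le_length cs "_translate(".toList
    omega
  have hple : n + 11 ≤ cs.length := by
    have hl := hpre.length_le
    rw [List.length_drop] at hl
    rw [show ("_translate(".toList).length = 11 from rfl] at hl
    omega
  by_cases hop : n + 11 < cs.length
  case neg =>
    have hnil : cs.drop (n + 11) = [] := List.drop_eq_nil_of_le (by omega)
    rw [if_pos (show ((n + 11 : Nat) : Int) ≥ (cs.length : Int) by push_cast; omega)]
    rw [if_pos (show ¬ (PySem.Chars.startswith (cs.drop (n + 11)) ['"'] = true) by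
      rw [hnil, PySem.Chars.startswith_iff, List.prefix_nil]; simp)]
  case pos =>
  rw [if_neg (show ¬ (((n + 11 : Nat) : Int) ≥ (cs.length : Int)) by push_cast; omega)]
  have hdropop : cs.drop (n + 11) = cs[n + 11] :: cs.drop (n + 12) := by
    rw [List.drop_eq_getElem_cons hop]
  by_cases hq : cs[n + 11]'hop = '"'
  case neg =>
    rw [if_pos (show PySem.List.pyGetD cs ((n + 11 : Nat) : Int) ' ' ≠ '"' by
      rw [PySem.List.pyGetD_natCast, List.getD_eq_getElem?_getD, List.getElem?_eq_getElem hop]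
      simpa using hq)]
    rw [if_pos (show ¬ (PySem.Chars.startswith (cs.drop (n + 11)) ['"'] = true) by
      rw [PySem.Chars.startswith_iff, hdropop, List.cons_prefix_cons]
      intro hcon
      exact hq hcon.1.symm)]
  case pos =>
  rw [if_neg (show ¬ (PySem.List.pyGetD cs ((n + 11 : Nat) : Int) ' ' ≠ '"') by
    rw [PySem.List.pyGetD_natCast, List.getD_eq_getElem?_getD, List.getElem?_eq_getElem hop]
    simpa using hq)]
  rw [if_neg (show ¬ ¬ (PySem.Chars.startswith (cs.drop (n + 11)) ['"'] = true) by
    rw [PySem.Chars.startswith_iff, hdropop, List.cons_prefix_cons]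
    simp [hq])]
  -- first scan
  rw [List.tail_drop, scan_eq_fcq]
  rw [fcq_drop cs (n + 11 + 1)]
  rw [show n + 11 + 1 = n + 12 from rfl]
  cases hf1 : findClosingQuote (cs.drop (n + 12)) 0 with
  | none => rfl
  | some e0 =>
  simp only [Option.map_some]
  have he0 : (cs.drop (n + 12))[e0]? = some '"' := fcq_quote _ 0 e0 hf1
  have he0lt : n + 12 + e0 < cs.length := by
    have := List.getElem?_eq_some_iff.mp he0
    obtain ⟨hlt, -⟩ := this
    rw [List.length_drop] at hlt
    omega
  have hdq1 : cs.drop (n + 12 + e0) = '"' :: cs.drop (n + 12 + e0 + 1) := by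
    have h2 : (cs.drop (n + 12)).drop e0 = cs.drop (n + 12 + e0) := List.drop_drop
    have h3 := List.drop_eq_getElem_cons (l := cs) (i := n + 12 + e0) (by omega)
    rw [h3]
    congr 1
    have := List.getElem?_drop (xs := cs) (i := n + 12) (j := e0)
    rw [he0] at this
    have := List.getElem?_eq_some_iff.mp this.symm
    obtain ⟨h4, h5⟩ := this
    exact h5
  -- align the suffix after the first string
  rw [List.drop_drop, List.drop_drop]
  rw [show n + 12 + (e0 + 1) = e0 + (n + 12) + 1 from by omega]
  have hafle : e0 + (n + 12) + 1 ≤ cs.length := by omega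
  rcases hd : cs.drop (e0 + (n + 12) + 1) with _ | ⟨x, _ | ⟨y, _ | ⟨z, rest3⟩⟩⟩
  · -- fewer than 2 chars remain
    have hlen2 : cs.length - (e0 + (n + 12) + 1) = 0 := by
      have := congrArg List.length hd; simpa using this
    rw [if_pos (show e0 + (n + 12) + 1 + 2 > cs.length by omega)]
    rw [if_pos (show ¬ (PySem.Chars.startswith ([] : List Char) ", \"".toList = true) by
      rw [PySem.Chars.startswith_iff]
      simp [List.prefix_nil])]
  · have hlen2 : cs.length - (e0 + (n + 12) + 1) = 1 := by
      have := congrArg List.length hd; simpa using this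
    rw [if_pos (show e0 + (n + 12) + 1 + 2 > cs.length by omega)]
    rw [if_pos (show ¬ (PySem.Chars.startswith [x] ", \"".toList = true) by
      rw [PySem.Chars.startswith_iff]
      rw [show ", \"".toList = [',', ' ', '\"'] from rfl]
      rw [List.cons_prefix_cons]
      rintro ⟨-, hpp⟩
      rw [List.prefix_nil] at hpp
      exact absurd hpp (by simp))]
  · have hlen2 : cs.length - (e0 + (n + 12) + 1) = 2 := by
      have := congrArg List.length hd; simpa using this
    rw [if_neg (show ¬ (e0 + (n + 12) + 1 + 2 > cs.length) by omega)]
    have hslice2 : PySem.List.slice cs (some ((e0 + (n + 12) + 1 : Nat) : Int))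
        (some (((e0 + (n + 12) + 1 : Nat) : Int) + 2)) = [x, y] := by
      rw [show (((e0 + (n + 12) + 1 : Nat) : Int) + 2) = ((e0 + (n + 12) + 1 + 2 : Nat) : Int) from by push_cast; ring]
      rw [PySem.List.slice_natCast, show e0 + (n + 12) + 1 + 2 - (e0 + (n + 12) + 1) = 2 from by omega, hd]
      rfl
    by_cases hxy : x = ',' ∧ y = ' '
    · obtain ⟨rfl, rfl⟩ := hxy
      rw [if_neg (show ¬ (PySem.List.slice cs (some ((e0 + (n + 12) + 1 : Nat) : Int))
          (some (((e0 + (n + 12) + 1 : Nat) : Int) + 2)) ≠ ", ".toList) by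
        rw [hslice2]; simp)]
      rw [if_pos (show ((e0 + (n + 12) + 1 + 2 : Nat) : Int) ≥ (cs.length : Int) by push_cast; omega)]
      rw [if_pos (show ¬ (PySem.Chars.startswith [',', ' '] ", \"".toList = true) by
        rw [PySem.Chars.startswith_iff]
        rw [show ", \"".toList = [',', ' ', '\"'] from rfl]
        rw [List.cons_prefix_cons, List.cons_prefix_cons]
        rintro ⟨-, -, hpp⟩
        rw [List.prefix_nil] at hpp
        exact absurd hpp (by simp))]
    · rw [if_pos (show PySem.List.slice cs (some ((e0 + (n + 12) + 1 : Nat) : Int))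
          (some (((e0 + (n + 12) + 1 : Nat) : Int) + 2)) ≠ ", ".toList by
        rw [hslice2, show ", ".toList = [',', ' '] from rfl]
        intro hcon
        exact hxy ⟨by injection hcon, by injection hcon with _ h2; injection h2⟩)]
      rw [if_pos (show ¬ (PySem.Chars.startswith [x, y] ", \"".toList = true) by
        rw [PySem.Chars.startswith_iff]
        rw [show ", \"".toList = [',', ' ', '\"'] from rfl]
        rw [List.cons_prefix_cons, List.cons_prefix_cons]
        rintro ⟨hpx, hpy, -⟩
        exact hxy ⟨hpx.symm, hpy.symm⟩)]
  · -- at least three characters remain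
    have hlen3 : 3 ≤ cs.length - (e0 + (n + 12) + 1) := by
      have := congrArg List.length hd; simp at this; omega
    have hslice2 : PySem.List.slice cs (some ((e0 + (n + 12) + 1 : Nat) : Int))
        (some (((e0 + (n + 12) + 1 : Nat) : Int) + 2)) = [x, y] := by
      rw [show (((e0 + (n + 12) + 1 : Nat) : Int) + 2) = ((e0 + (n + 12) + 1 + 2 : Nat) : Int) from by push_cast; ring]
      rw [PySem.List.slice_natCast, show e0 + (n + 12) + 1 + 2 - (e0 + (n + 12) + 1) = 2 from by omega, hd]
      rfl
    rw [if_neg (show ¬ (e0 + (n + 12) + 1 + 2 > cs.length) by omega)]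
    by_cases hxy : x = ',' ∧ y = ' '
    case neg =>
      rw [if_pos (show PySem.List.slice cs (some ((e0 + (n + 12) + 1 : Nat) : Int))
          (some (((e0 + (n + 12) + 1 : Nat) : Int) + 2)) ≠ ", ".toList by
        rw [hslice2, show ", ".toList = [',', ' '] from rfl]
        intro hcon
        exact hxy ⟨by injection hcon, by injection hcon with _ h2; injection h2⟩)]
      rw [if_pos (show ¬ (PySem.Chars.startswith (x :: y :: z :: rest3) ", \"".toList = true) by
        rw [PySem.Chars.startswith_iff]
        rw [show ", \"".toList = [',', ' ', '\"'] from rfl]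
        rw [List.cons_prefix_cons, List.cons_prefix_cons]
        rintro ⟨hpx, hpy, -⟩
        exact hxy ⟨hpx.symm, hpy.symm⟩)]
    case pos =>
    obtain ⟨rfl, rfl⟩ := hxy
    rw [if_neg (show ¬ (PySem.List.slice cs (some ((e0 + (n + 12) + 1 : Nat) : Int))
        (some (((e0 + (n + 12) + 1 : Nat) : Int) + 2)) ≠ ", ".toList) by rw [hslice2]; simp)]
    rw [if_neg (show ¬ (((e0 + (n + 12) + 1 + 2 : Nat) : Int) ≥ (cs.length : Int)) by push_cast; omega)]
    have hgz : cs[e0 + (n + 12) + 1 + 2]? = some z := by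
      have h2 : (cs.drop (e0 + (n + 12) + 1))[2]? = cs[e0 + (n + 12) + 1 + 2]? := List.getElem?_drop
      rw [hd] at h2
      simpa using h2.symm
    by_cases hz : z = '\"'
    case neg =>
      rw [if_pos (show PySem.List.pyGetD cs ((e0 + (n + 12) + 1 + 2 : Nat) : Int) ' ' ≠ '\"' by
        rw [PySem.List.pyGetD_natCast, List.getD_eq_getElem?_getD, hgz]
        simpa using hz)]
      rw [if_pos (show ¬ (PySem.Chars.startswith (',' :: ' ' :: z :: rest3) ", \"".toList = true) by
        rw [PySem.Chars.startswith_iff]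
        rw [show ", \"".toList = [',', ' ', '\"'] from rfl]
        rw [List.cons_prefix_cons, List.cons_prefix_cons, List.cons_prefix_cons]
        rintro ⟨-, -, hpz, -⟩
        exact hz hpz.symm)]
    case pos =>
    subst hz
    rw [if_neg (show ¬ (PySem.List.pyGetD cs ((e0 + (n + 12) + 1 + 2 : Nat) : Int) ' ' ≠ '\"') by
      rw [PySem.List.pyGetD_natCast, List.getD_eq_getElem?_getD, hgz]
      simp)]
    rw [if_neg (show ¬ ¬ (PySem.Chars.startswith (',' :: ' ' :: '\"' :: rest3) ", \"".toList = true) by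
      rw [PySem.Chars.startswith_iff]
      rw [show ", \"".toList = [',', ' ', '\"'] from rfl]
      simp [List.cons_prefix_cons])]
    -- second scan
    have hdrop3 : cs.drop (e0 + (n + 12) + 1 + 3) = rest3 := by
      have h2 : (cs.drop (e0 + (n + 12) + 1)).drop 3 = cs.drop (e0 + (n + 12) + 1 + 3) := List.drop_drop
      rw [hd] at h2
      simpa using h2.symm
    rw [hdrop3, scan_eq_fcq]
    rw [show e0 + (n + 12) + 1 + 2 + 1 = e0 + (n + 12) + 1 + 3 from by omega]
    rw [fcq_drop cs (e0 + (n + 12) + 1 + 3), hdrop3]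
    cases hf2 : findClosingQuote rest3 0 with
    | none => rfl
    | some e1 =>
    simp only [Option.map_some, List.nil_append]
    rw [indent_eq]
    rw [show (((e0 + (n + 12) + 1 + 2 : Nat) : Int) + 1) = ((e0 + (n + 12) + 1 + 3 : Nat) : Int) from by
      push_cast; ring]
    rw [PySem.List.slice_natCast cs (e0 + (n + 12) + 1 + 3) (e1 + (e0 + (n + 12) + 1 + 3))]
    rw [show e1 + (e0 + (n + 12) + 1 + 3) - (e0 + (n + 12) + 1 + 3) = e1 from by omega, hdrop3]
    rw [show (((e1 + (e0 + (n + 12) + 1 + 3) : Nat) : Int) + 1) = ((e1 + (e0 + (n + 12) + 1 + 3) + 1 : Nat) : Int) from by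
      push_cast; ring]
    rw [PySem.List.slice_from_natCast]
    have hBtl : List.drop (e1 + 1) rest3 = List.drop (e1 + (e0 + (n + 12) + 1 + 3) + 1) cs := by
      rw [← hdrop3, List.drop_drop]
      congr 1
      omega
    rw [hBtl]
    rw [PySem.List.slice_to_natCast]
    have t1 : cs.take (n + 11) = cs.take n ++ "_translate(".toList := by
      rw [List.take_add]
      congr 1
      have h2 := List.prefix_iff_eq_take.mp hpre
      rw [show ("_translate(".toList).length = 11 from rfl] at h2
      exact h2.symm
    have t2 : cs.take (n + 12) = cs.take (n + 11) ++ ['\"'] := by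
      rw [show n + 12 = n + 11 + 1 from rfl, List.take_add]
      congr 1
      rw [hdropop, hq]
      rfl
    have t4 : cs.take (e0 + (n + 12) + 1) = cs.take (n + 12 + e0) ++ ['\"'] := by
      rw [show e0 + (n + 12) + 1 = n + 12 + e0 + 1 from by omega, List.take_add]
      congr 1
      rw [hdq1]
      rfl
    have t5 : cs.take (e0 + (n + 12) + 1 + 2) = cs.take (e0 + (n + 12) + 1) ++ [',', ' '] := by
      rw [List.take_add]
      congr 1
      rw [hd]
      rfl
    have hpfx : cs.take (e0 + (n + 12) + 1 + 2)
        = List.take n cs ++ "_translate(\"".toList ++ List.take e0 (List.drop (n + 12) cs) ++ "\", ".toList := by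
      rw [t5, t4, List.take_add (l := cs) (i := n + 12) (j := e0), t2, t1]
      rw [show "_translate(\"".toList = "_translate(".toList ++ ['\"'] from rfl,
        show "\", ".toList = ['\"', ',', ' '] from rfl]
      simp
    rw [hpfx]
    rw [chunkWords_eq_pack _ _ (splitOn_ne_nil _ _)]
    by_cases hmc : ml - ((List.takeWhile PySem.Chars.isspace cs ++ "    ".toList).length : Int) - 2 < 10
    · rw [if_pos hmc, if_pos hmc]
    rw [if_neg hmc, if_neg hmc]
    by_cases hch : (pack (PySem.Chars.splitOn (List.take e1 rest3) [' '])
        (ml - ((List.takeWhile PySem.Chars.isspace cs ++ "    ".toList).length : Int) - 2)).length ≤ 1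
    · rw [if_pos hch, if_pos hch]
    rw [if_neg hch, if_neg hch]
    have hne : pack (PySem.Chars.splitOn (List.take e1 rest3) [' '])
        (ml - ((List.takeWhile PySem.Chars.isspace cs ++ "    ".toList).length : Int) - 2) ≠ [] := by
      intro hnil
      rw [hnil] at hch
      exact hch (by simp)
    by_cases hpl : ((List.take n cs ++ "_translate(\"".toList ++ List.take e0 (List.drop (n + 12) cs) ++ "\", ".toList).length : Int) > ml
    · rw [if_pos hpl, if_pos hpl]
    rw [if_neg hpl, if_neg hpl]
    rw [PySem.List.slice_to_neg_one, PySem.List.foldl_append_singleton_eq_map]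
    rw [PySem.List.pyGetD_neg_one _ _ hne]
    rw [List.getLastI_eq_getLast?_getD, List.getLast?_eq_some_getLast hne]
    rfl

-- ===== VERDICT (by name: the statement is the Claim_ definition above) =====
theorem split_translate_line_py_spec : Claim_equal_split_translate_line_py := by
  intro line ml _
  unfold Spec_split_translate_line_py split_translate_line_py split_translate_line_py_alt
  rw [core_eq]
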